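-- pv_equiv track=rewrite | github.com/almashooq1/alawael-erp | ai_services.py | _generate_optimization_summary
-- ===== SOURCE A (Python) =====
-- def _generate_optimization_summary(assignments):
--     """توليد ملخص التحسين"""
--     if not assignments:
--         return "لم يتم العثور على توزيعات مناسبة"
--
--     high_match_count = len([a for a in assignments if a['match_score'] >= 80])
--     medium_match_count = len([a for a in assignments if 60 <= a['match_score'] < 80])
--     low_match_count = len([a for a in assignments if a['match_score'] < 60])
--
--     summary = f"تم توزيع {len(assignments)} مهمة: "
--     summary += f"{high_match_count} توزيعات ممتازة، "
--     summary += f"{medium_match_count} توزيعات جيدة، "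
--     summary += f"{low_match_count} توزيعات تحتاج مراجعة"
--
--     return summary
-- ===== SOURCE B (Python) =====
-- def _generate_optimization_summary(assignments):
--     """توليد ملخص التحسين"""
--     if not assignments:
--         return "لم يتم العثور على توزيعات مناسبة"
--
--     high = medium = low = 0
--     for a in assignments:
--         score = a['match_score']
--         if score >= 80:
--             high += 1
--         elif score >= 60:
--             medium += 1
--         else:
--             low += 1
--
--     return (f"تم توزيع {len(assignments)} مهمة: "
--             f"{high} توزيعات ممتازة، "
--             f"{medium} توزيعات جيدة، "
--             f"{low} توزيعات تحتاج مراجعة")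
-- ===== Notes on version B (the rewrite author's own statement) =====
-- stated objective: alternative
-- what changed: Replaces three separate filtering passes (one list comprehension per bucket) with a single loop that reads each match_score once and increments high/medium/low counters via an if/elif/else chain.
import Mathlib
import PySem

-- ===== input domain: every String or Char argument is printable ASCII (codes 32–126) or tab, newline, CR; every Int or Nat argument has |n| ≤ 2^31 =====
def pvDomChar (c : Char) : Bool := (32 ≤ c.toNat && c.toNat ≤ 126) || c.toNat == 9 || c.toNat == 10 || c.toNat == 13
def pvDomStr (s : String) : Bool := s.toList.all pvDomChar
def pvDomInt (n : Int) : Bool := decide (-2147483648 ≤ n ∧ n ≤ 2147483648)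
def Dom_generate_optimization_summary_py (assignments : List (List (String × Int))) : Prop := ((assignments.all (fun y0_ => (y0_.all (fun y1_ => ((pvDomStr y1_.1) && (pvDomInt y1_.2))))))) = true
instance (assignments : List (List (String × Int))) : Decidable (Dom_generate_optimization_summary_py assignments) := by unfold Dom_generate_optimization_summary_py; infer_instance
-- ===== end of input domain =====

-- B replaces A's three filtering passes over `assignments` with a single counting loop reading each score once; same return value on all inputs where A returns.

-- ===== PORT A =====
-- a['match_score']: first-match lookup; Pre_ guarantees the key is present (Python raises KeyError otherwise), so getD 0 is never the default on admitted inputs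
def pvScoreA (a : List (String × Int)) : Int := (List.lookup "match_score" a).getD 0

def generate_optimization_summary_py (assignments : List (List (String × Int))) : String :=
  if assignments = [] then "لم يتم العثور على توزيعات مناسبة"
  else
    let high_match_count := (assignments.filter (fun a => decide (80 ≤ pvScoreA a))).length
    let medium_match_count := (assignments.filter (fun a => decide (60 ≤ pvScoreA a ∧ pvScoreA a < 80))).length
    let low_match_count := (assignments.filter (fun a => decide (pvScoreA a < 60))).length
    "تم توزيع " ++ PySem.Int.toStr assignments.length ++ " مهمة: "
      ++ PySem.Int.toStr high_match_count ++ " توزيعات ممتازة، "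
      ++ PySem.Int.toStr medium_match_count ++ " توزيعات جيدة، "
      ++ PySem.Int.toStr low_match_count ++ " توزيعات تحتاج مراجعة"

-- ===== PORT B =====
def pvScoreB (a : List (String × Int)) : Int := (List.lookup "match_score" a).getD 0

-- one step of B's single counting loop: (high, medium, low)
def pvCountStep (acc : Int × Int × Int) (a : List (String × Int)) : Int × Int × Int :=
  let score := pvScoreB a
  if 80 ≤ score then (acc.1 + 1, acc.2.1, acc.2.2)
  else if 60 ≤ score then (acc.1, acc.2.1 + 1, acc.2.2)
  else (acc.1, acc.2.1, acc.2.2 + 1)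

def generate_optimization_summary_py_alt (assignments : List (List (String × Int))) : String :=
  if assignments = [] then "لم يتم العثور على توزيعات مناسبة"
  else
    let c := assignments.foldl pvCountStep (0, 0, 0)
    "تم توزيع " ++ PySem.Int.toStr assignments.length ++ " مهمة: "
      ++ PySem.Int.toStr c.1 ++ " توزيعات ممتازة، "
      ++ PySem.Int.toStr c.2.1 ++ " توزيعات جيدة، "
      ++ PySem.Int.toStr c.2.2 ++ " توزيعات تحتاج مراجعة"

-- ===== PRECONDITION & SPEC =====
-- Pre_ excludes assignments missing the 'match_score' key, on which Python A raises KeyError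
def Pre_generate_optimization_summary_py (assignments : List (List (String × Int))) : Prop :=
  (assignments.all (fun a => (List.lookup "match_score" a).isSome)) = true
instance (assignments : List (List (String × Int))) : Decidable (Pre_generate_optimization_summary_py assignments) := by unfold Pre_generate_optimization_summary_py; infer_instance
def pvWitness_generate_optimization_summary_py : (List (List (String × Int))) := [[("match_score", 85)], [("match_score", 42)]]

def Spec_generate_optimization_summary_py (assignments : List (List (String × Int))) (out : String) : Prop := out = generate_optimization_summary_py_alt assignments
instance (assignments : List (List (String × Int))) (out : String) : Decidable (Spec_generate_optimization_summary_py assignments out) := by unfold Spec_generate_optimization_summary_py; infer_instance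

-- ===== CLAIM (what is proved, stated in full; the proofs are below) =====
def Claim_equal_generate_optimization_summary_py : Prop := ∀ (assignments : List (List (String × Int))), Dom_generate_optimization_summary_py assignments → Pre_generate_optimization_summary_py assignments → Spec_generate_optimization_summary_py assignments (generate_optimization_summary_py assignments)

-- ===== LEMMAS AND PROOFS =====
lemma pvCount_fold (xs : List (List (String × Int))) (h m l : Int) :
    xs.foldl pvCountStep (h, m, l) =
      (h + (xs.countP (fun a => decide (80 ≤ pvScoreB a)) : Int),
       m + (xs.countP (fun a => decide (¬ 80 ≤ pvScoreB a ∧ 60 ≤ pvScoreB a)) : Int),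
       l + (xs.countP (fun a => decide (¬ 80 ≤ pvScoreB a ∧ ¬ 60 ≤ pvScoreB a)) : Int)) := by
  induction xs generalizing h m l with
  | nil => simp
  | cons x xs ih =>
    simp only [List.foldl_cons, List.countP_cons, pvCountStep]
    split_ifs with h1 h2 <;> rw [ih] <;> simp_all [Prod.ext_iff] <;> omega

theorem generate_optimization_summary_py_spec_aux (assignments : List (List (String × Int))) :
    generate_optimization_summary_py assignments = generate_optimization_summary_py_alt assignments := by
  unfold generate_optimization_summary_py generate_optimization_summary_py_alt
  split_ifs with he
  · rfl
  · rw [pvCount_fold]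
    have hBA : pvScoreB = pvScoreA := rfl
    rw [List.countP_congr (p := fun a => decide (¬ 80 ≤ pvScoreB a ∧ 60 ≤ pvScoreB a))
        (q := fun a => decide (60 ≤ pvScoreA a ∧ pvScoreA a < 80))
        (fun a _ => by simp [hBA]; omega),
      List.countP_congr (p := fun a => decide (¬ 80 ≤ pvScoreB a ∧ ¬ 60 ≤ pvScoreB a))
        (q := fun a => decide (pvScoreA a < 60))
        (fun a _ => by simp [hBA]; omega)]
    simp [hBA, List.countP_eq_length_filter]

-- ===== VERDICT (by name: the statement is the Claim_ definition above) =====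
theorem generate_optimization_summary_py_spec : Claim_equal_generate_optimization_summary_py := by
  intro assignments _ _
  exact (generate_optimization_summary_py_spec_aux assignments).symm ▸ rfl
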